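-- pv_equiv track=rewrite | github.com/Sunzheini/timesheets | support/support_functions.py | add_a_total_dict_to_nested_dict
-- ===== SOURCE A (Python) =====
-- def add_a_total_dict_to_nested_dict(dict_to_add_total_to):
--     """
--     Add a total dictionary to a nested dictionary by summing up the values of the inner dictionaries
--     :param dict_to_add_total_to: the dictionary to add the total dictionary to
--     :return: the dictionary with the total dictionary added
--     """
--     total_dict_key = 'Total Ʃ Hours'
--     total_dict_value = {}
--
--     for key, value in dict_to_add_total_to.items():
--         for inner_key, inner_value in value.items():
--             if inner_key not in total_dict_value:
--                 total_dict_value[inner_key] = inner_value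
--             else:
--                 total_dict_value[inner_key] += inner_value
--
--     dict_to_add_total_to[total_dict_key] = total_dict_value
--     return dict_to_add_total_to
-- ===== SOURCE B (Python) =====
-- def add_a_total_dict_to_nested_dict(dict_to_add_total_to):
--     """Key-major re-implementation: collect distinct inner keys first, then one scan per key."""
--     total_dict_key = 'Total \u01a9 Hours'
--     keys = []
--     for value in dict_to_add_total_to.values():
--         for inner_key in value:
--             if inner_key not in keys:
--                 keys.append(inner_key)
--
--     total_dict_value = {}
--     for key in keys:
--         occurrences = [value[key] for value in dict_to_add_total_to.values() if key in value]
--         total = occurrences[0]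
--         for extra in occurrences[1:]:
--             total += extra
--         total_dict_value[key] = total
--
--     dict_to_add_total_to[total_dict_key] = total_dict_value
--     return dict_to_add_total_to
-- ===== Notes on version B (the rewrite author's own statement) =====
-- stated objective: alternative
-- what changed: Key-major traversal: B first collects the distinct inner keys in first-appearance order, then computes each key's total by one scan over the outer dicts (seeding from the first occurrence), instead of A's single item-major pass that upserts into the totals dict; this trades A's single pass for one scan per distinct key, so B is slower on large inputs.
import Mathlib
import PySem

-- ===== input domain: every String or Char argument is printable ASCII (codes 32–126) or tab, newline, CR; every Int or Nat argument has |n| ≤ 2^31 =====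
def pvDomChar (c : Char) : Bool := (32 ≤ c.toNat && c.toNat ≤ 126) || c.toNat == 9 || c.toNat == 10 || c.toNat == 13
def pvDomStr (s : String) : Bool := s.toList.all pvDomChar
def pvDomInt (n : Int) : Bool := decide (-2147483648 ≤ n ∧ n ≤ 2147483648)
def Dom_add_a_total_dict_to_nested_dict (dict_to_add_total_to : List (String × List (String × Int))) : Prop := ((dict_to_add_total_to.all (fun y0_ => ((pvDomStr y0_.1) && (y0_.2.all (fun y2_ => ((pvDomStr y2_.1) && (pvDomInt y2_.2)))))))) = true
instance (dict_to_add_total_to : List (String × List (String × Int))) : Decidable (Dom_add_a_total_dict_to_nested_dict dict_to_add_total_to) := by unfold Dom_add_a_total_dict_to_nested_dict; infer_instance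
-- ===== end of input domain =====

-- B replaces A's item-major upsert pass by a key-major traversal (distinct inner keys first,
-- then one scan per key); like A it puts the totals under 'Total Ʃ Hours' in the input dict.
-- Equivalence is about the return value; both Pythons mutate the argument the same way.

-- ===== PORT A =====
-- the inner-loop body: if inner_key not in total: total[ik] = iv else: total[ik] += iv
def pvStepA (acc : PySem.Dict String Int) (p : String × Int) : PySem.Dict String Int :=
  if acc.contains p.1 then acc.insert p.1 (acc.getD p.1 0 + p.2) else acc.insert p.1 p.2

def add_a_total_dict_to_nested_dict (dict_to_add_total_to : List (String × List (String × Int))) : List (String × List (String × Int)) :=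
  let total := dict_to_add_total_to.foldl (fun acc kv => kv.2.foldl pvStepA acc) PySem.Dict.empty
  ((PySem.Dict.mk dict_to_add_total_to).insert "Total Ʃ Hours" total.items).items

-- ===== PORT B =====
-- first loop of B: distinct inner keys, first-appearance order
def pvKeysB (d : List (String × List (String × Int))) : List String :=
  d.foldl (fun ks kv => kv.2.foldl (fun ks p => if p.1 ∈ ks then ks else ks ++ [p.1]) ks) []

-- [value[key] for value in d.values() if key in value]
def pvOccB (d : List (String × List (String × Int))) (k : String) : List Int :=
  d.foldl (fun l kv => match (PySem.Dict.mk kv.2).get? k with | some x => l ++ [x] | none => l) []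

-- total = occurrences[0]; for extra in occurrences[1:]: total += extra
-- (the [] branch is unreachable: every key in pvKeysB occurs in some inner dict)
def pvTotB (d : List (String × List (String × Int))) (k : String) : Int :=
  match pvOccB d k with
  | [] => 0
  | h :: t => t.foldl (· + ·) h

def add_a_total_dict_to_nested_dict_alt (dict_to_add_total_to : List (String × List (String × Int))) : List (String × List (String × Int)) :=
  let totals := (pvKeysB dict_to_add_total_to).foldl
    (fun acc k => acc.insert k (pvTotB dict_to_add_total_to k)) (PySem.Dict.empty : PySem.Dict String Int)
  ((PySem.Dict.mk dict_to_add_total_to).insert "Total Ʃ Hours" totals.items).items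

-- ===== PRECONDITION & SPEC =====
-- Pre_ only requires each inner association list to have distinct keys — exactly the lists that
-- represent Python dicts (a Python dict can never have duplicate keys, so no Python input is excluded).
def Pre_add_a_total_dict_to_nested_dict (dict_to_add_total_to : List (String × List (String × Int))) : Prop :=
  ∀ kv ∈ dict_to_add_total_to, (kv.2.map Prod.fst).Nodup
instance (dict_to_add_total_to : List (String × List (String × Int))) : Decidable (Pre_add_a_total_dict_to_nested_dict dict_to_add_total_to) := by unfold Pre_add_a_total_dict_to_nested_dict; infer_instance

def pvWitness_add_a_total_dict_to_nested_dict : (List (String × List (String × Int))) :=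
  [("mon", [("x", 1), ("y", 2)]), ("tue", [("x", 3)]), ("wed", [])]

def Spec_add_a_total_dict_to_nested_dict (dict_to_add_total_to : List (String × List (String × Int))) (out : List (String × List (String × Int))) : Prop := out = add_a_total_dict_to_nested_dict_alt dict_to_add_total_to
instance (dict_to_add_total_to : List (String × List (String × Int))) (out : List (String × List (String × Int))) : Decidable (Spec_add_a_total_dict_to_nested_dict dict_to_add_total_to out) := by unfold Spec_add_a_total_dict_to_nested_dict; infer_instance

-- ===== CLAIM (what is proved, stated in full; the proofs are below) =====
def Claim_equal_add_a_total_dict_to_nested_dict : Prop := ∀ (dict_to_add_total_to : List (String × List (String × Int))), Dom_add_a_total_dict_to_nested_dict dict_to_add_total_to → Pre_add_a_total_dict_to_nested_dict dict_to_add_total_to → Spec_add_a_total_dict_to_nested_dict dict_to_add_total_to (add_a_total_dict_to_nested_dict dict_to_add_total_to)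

-- ===== LEMMAS AND PROOFS =====

-- a fold over the flattened inner lists equals the nested fold both ports use
theorem pv_foldl_flatMap {α β σ : Type} (f : σ → α → σ) (g : β → List α) :
    ∀ (l : List β) (init : σ),
      (l.flatMap g).foldl f init = l.foldl (fun s b => (g b).foldl f s) init := by
  intro l
  induction l with
  | nil => intro init; rfl
  | cons hd tl ih => intro init; simp [List.flatMap_cons, List.foldl_append, ih]

-- key-collection step (shared shape of B's first loop)
def pvStepK (ks : List String) (p : String × Int) : List String :=
  if p.1 ∈ ks then ks else ks ++ [p.1]

theorem mem_foldl_stepK : ∀ (ps : List (String × Int)) (acc : List String) (k : String),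
    k ∈ ps.foldl pvStepK acc ↔ k ∈ acc ∨ k ∈ ps.map Prod.fst := by
  intro ps
  induction ps with
  | nil => simp
  | cons p tl ih =>
    intro acc k
    simp only [List.foldl_cons, List.map_cons, List.mem_cons]
    rw [ih]
    unfold pvStepK
    split_ifs with h
    · constructor
      · tauto
      · rintro (h1 | h1 | h2)
        · tauto
        · subst h1; tauto
        · tauto
    · simp only [List.mem_append, List.mem_singleton]
      tauto

theorem nodup_foldl_stepK : ∀ (ps : List (String × Int)) (acc : List String),
    acc.Nodup → (ps.foldl pvStepK acc).Nodup := by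
  intro ps
  induction ps with
  | nil => intro acc h; exact h
  | cons p tl ih =>
    intro acc h
    simp only [List.foldl_cons]
    apply ih
    unfold pvStepK
    split_ifs with hm
    · exact h
    · simp only [List.nodup_append, List.nodup_singleton, h, true_and]
      intro a ha b hb
      have hb' : b = p.1 := by simpa using hb
      subst hb'
      exact fun hae => hm (hae ▸ ha)

def pvSumOf (ps : List (String × Int)) (k : String) : Int :=
  ((ps.filter (fun p => p.1 == k)).map Prod.snd).sum

-- flattened view of all inner (key, value) pairs
def pvPairs (d : List (String × List (String × Int))) : List (String × Int) :=
  d.flatMap Prod.snd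

-- characterization of A's totals fold: first-appearance keys, each mapped to the sum of its values
theorem pvAchar : ∀ (ps : List (String × Int)),
    ps.foldl pvStepA PySem.Dict.empty
      = PySem.Dict.mk ((ps.foldl pvStepK []).map (fun k => (k, pvSumOf ps k))) := by
  intro ps
  induction ps using List.reverseRecOn with
  | nil => rfl
  | append_singleton ps p ih =>
    have hkeys : ((ps.foldl pvStepK []).map (fun k' => ((k', pvSumOf ps k') : String × Int))).map Prod.fst
        = ps.foldl pvStepK [] := by
      rw [List.map_map]; simp [Function.comp_def]
    have hnodupkeys : (ps.foldl pvStepK []).Nodup := nodup_foldl_stepK ps [] List.nodup_nil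
    have hsum : ∀ k' : String, pvSumOf (ps ++ [p]) k'
        = pvSumOf ps k' + (if p.1 = k' then p.2 else 0) := by
      intro k'
      unfold pvSumOf
      simp only [List.filter_append, List.map_append, List.sum_append]
      by_cases h : p.1 = k'
      · simp [h, List.filter]
      · have hb : (p.1 == k') = false := by simp [h]
        simp [List.filter, hb, h]
    rw [List.foldl_append, List.foldl_append, ih]
    simp only [List.foldl_cons, List.foldl_nil]
    unfold pvStepA
    by_cases hc : p.1 ∈ ps.foldl pvStepK []
    · -- existing key: overwrite in place
      have hcontains : (PySem.Dict.mk ((ps.foldl pvStepK []).map (fun k' => (k', pvSumOf ps k')))).contains p.1 = true := by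
        rw [PySem.Dict.contains_eq_decide_mem_keys]
        simp only [PySem.Dict.keys_mk, hkeys]
        simpa using hc
      have hgetD : (PySem.Dict.mk ((ps.foldl pvStepK []).map (fun k' => (k', pvSumOf ps k')))).getD p.1 0 = pvSumOf ps p.1 := by
        apply PySem.Dict.getD_of_mem_items
        · exact List.mem_map_of_mem hc
        · simp only [PySem.Dict.keys_mk, hkeys]; exact hnodupkeys
      rw [if_pos hcontains,
        show pvStepK (ps.foldl pvStepK []) p = ps.foldl pvStepK [] from if_pos hc]
      apply PySem.Dict.ext
      rw [PySem.Dict.items_insert_of_contains _ _ hcontains]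
      simp only [List.map_map]
      apply List.map_congr_left
      intro k' hk'
      simp only [Function.comp]
      rw [hsum k']
      by_cases h : k' = p.1
      · subst h; simp [hgetD]
      · have hb : (k' == p.1) = false := by simp [h]
        simp only [hb, Bool.false_eq_true, if_false]
        have h2 : ¬ p.1 = k' := fun hh => h hh.symm
        simp [h2]
    · -- fresh key: append
      have hcontains : (PySem.Dict.mk ((ps.foldl pvStepK []).map (fun k' => (k', pvSumOf ps k')))).contains p.1 = false := by
        rw [PySem.Dict.contains_eq_decide_mem_keys]
        simp only [PySem.Dict.keys_mk, hkeys]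
        simpa using hc
      have hnotin : p.1 ∉ ps.map Prod.fst := by
        intro hmem
        exact hc ((mem_foldl_stepK ps [] p.1).2 (Or.inr hmem))
      have hzero : pvSumOf ps p.1 = 0 := by
        unfold pvSumOf
        have hfe : ps.filter (fun q => q.1 == p.1) = [] := by
          apply List.filter_eq_nil_iff.2
          intro q hq hbeq
          exact hnotin (by
            have hq1 : q.1 = p.1 := by simpa using hbeq
            exact hq1 ▸ List.mem_map_of_mem hq)
        simp [hfe]
      rw [if_neg (by simp [hcontains]),
        show pvStepK (ps.foldl pvStepK []) p = ps.foldl pvStepK [] ++ [p.1] from if_neg hc]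
      apply PySem.Dict.ext
      rw [PySem.Dict.items_insert_of_not_contains _ _ hcontains]
      simp only [List.map_append, List.map_cons, List.map_nil]
      congr 1
      · apply List.map_congr_left
        intro k' hk'
        rw [hsum k']
        have h2 : ¬ p.1 = k' := fun h => hc (h ▸ hk')
        simp [h2]
      · rw [hsum p.1]
        simp [hzero]

-- B's key list is the first-appearance key list of the flattened pairs
theorem pvKeysB_eq (d : List (String × List (String × Int))) :
    pvKeysB d = (pvPairs d).foldl pvStepK [] := by
  unfold pvKeysB pvPairs pvStepK
  rw [pv_foldl_flatMap]

-- A's nested fold is the flattened fold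
theorem pvAfold_eq (d : List (String × List (String × Int))) :
    d.foldl (fun acc kv => kv.2.foldl pvStepA acc) PySem.Dict.empty
      = (pvPairs d).foldl pvStepA PySem.Dict.empty := by
  unfold pvPairs
  rw [pv_foldl_flatMap]

-- inner dict with distinct keys: the first-match lookup collects exactly the matching values
theorem pv_get?_eq_filter (k : String) :
    ∀ (v : List (String × Int)), (v.map Prod.fst).Nodup →
      (match (PySem.Dict.mk v).get? k with | some x => [x] | none => ([] : List Int))
        = (v.filter (fun p => p.1 == k)).map Prod.snd := by
  intro v
  induction v with
  | nil => intro _; rfl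
  | cons p tl ih =>
    intro hnd
    obtain ⟨k', x⟩ := p
    simp only [List.map_cons, List.nodup_cons] at hnd
    rw [PySem.Dict.get?_mk_cons]
    by_cases h : k' = k
    · subst h
      have hfilter : tl.filter (fun p => p.1 == k') = [] := by
        apply List.filter_eq_nil_iff.2
        intro p hp hbeq
        exact hnd.1 (by
          have : p.1 = k' := by simpa using hbeq
          exact this ▸ List.mem_map_of_mem hp)
      simp [hfilter]
    · have hb : (k' == k) = false := by simp [h]
      simp only [Bool.false_eq_true, if_false, List.filter_cons, hb]
      rw [← ih hnd.2]

-- B's occurrence list equals the flattened matching values, given distinct inner keys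
theorem pvOccB_eq (d : List (String × List (String × Int))) (k : String)
    (hpre : ∀ kv ∈ d, (kv.2.map Prod.fst).Nodup) :
    pvOccB d k = ((pvPairs d).filter (fun p => p.1 == k)).map Prod.snd := by
  unfold pvOccB pvPairs
  induction d using List.reverseRecOn with
  | nil => rfl
  | append_singleton d kv ih =>
    have hd : ∀ kv' ∈ d, (kv'.2.map Prod.fst).Nodup := fun kv' h => hpre kv' (List.mem_append_left _ h)
    have hkv : (kv.2.map Prod.fst).Nodup := hpre kv (List.mem_append_right _ (List.mem_singleton.2 rfl))
    rw [List.foldl_append, ih hd]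
    simp only [List.foldl_cons, List.foldl_nil, List.flatMap_append, List.flatMap_cons,
      List.flatMap_nil, List.append_nil, List.filter_append, List.map_append]
    rw [← pv_get?_eq_filter k kv.2 hkv]
    cases (PySem.Dict.mk kv.2).get? k <;> simp

theorem pv_foldl_add_eq_sum : ∀ (t : List Int) (h : Int), t.foldl (· + ·) h = h + t.sum := by
  intro t
  induction t with
  | nil => intro h; simp
  | cons a tl ih => intro h; simp only [List.foldl_cons, List.sum_cons]; rw [ih]; ring

-- B's per-key total is the sum of the matching values
theorem pvTotB_eq (d : List (String × List (String × Int))) (k : String)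
    (hpre : ∀ kv ∈ d, (kv.2.map Prod.fst).Nodup) :
    pvTotB d k = pvSumOf (pvPairs d) k := by
  unfold pvTotB pvSumOf
  rw [pvOccB_eq d k hpre]
  cases ((pvPairs d).filter (fun p => p.1 == k)).map Prod.snd with
  | nil => rfl
  | cons a tl => simp only [List.sum_cons]; rw [pv_foldl_add_eq_sum]

-- ===== VERDICT (by name: the statement is the Claim_ definition above) =====
theorem add_a_total_dict_to_nested_dict_spec : Claim_equal_add_a_total_dict_to_nested_dict := by
  intro d _hdom hpre
  unfold Spec_add_a_total_dict_to_nested_dict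
  unfold add_a_total_dict_to_nested_dict add_a_total_dict_to_nested_dict_alt
  simp only
  have hnodup : ((pvPairs d).foldl pvStepK []).Nodup := nodup_foldl_stepK _ [] List.nodup_nil
  have hfresh : ∀ k ∈ pvKeysB d, (PySem.Dict.empty : PySem.Dict String Int).contains k = false :=
    fun k _ => PySem.Dict.contains_empty k
  have htot : ((pvKeysB d).foldl (fun acc k => acc.insert k (pvTotB d k)) (PySem.Dict.empty : PySem.Dict String Int)).items
      = ((pvPairs d).foldl pvStepK []).map (fun k => (k, pvSumOf (pvPairs d) k)) := by
    rw [PySem.Dict.items_foldl_insert_fresh (pvKeysB d) (fun k => k) (fun k => pvTotB d k) _ hfresh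
      (by rw [pvKeysB_eq]; simpa using hnodup)]
    simp only [PySem.Dict.empty, List.nil_append, pvKeysB_eq]
    apply List.map_congr_left
    intro k _hk
    rw [pvTotB_eq d k hpre]
  rw [pvAfold_eq, pvAchar, htot]
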